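-- pv_equiv track=rewrite | github.com/RuiFSP/CodeWars | Python/6 kyu/numericals.py | numericals
-- ===== SOURCE A (Python) =====
-- from typing import Dict
--
-- def numericals(s: str) -> str:
--     """
--     Replaces each symbol in the string with the occurrence count.
--
--     Args:
--         input_string: The input string to process.
--
--     Returns:
--         The modified string with symbols replaced by occurrence count.
--     """
--     symbol_count: Dict[str, int] = {}
--     output_string = ""
--
--     for symbol in s:
--         if symbol not in symbol_count:
--             symbol_count[symbol] = 1
--         else:
--             symbol_count[symbol] += 1
--
--         output_string += str(symbol_count[symbol])
--
--     return output_string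
-- ===== SOURCE B (Python) =====
-- def numericals(s: str) -> str:
--     res = [''] * len(s)
--     for c in dict.fromkeys(s):
--         n = 0
--         new = []
--         for ch, cur in zip(s, res):
--             if ch == c:
--                 n += 1
--                 new.append(str(n))
--             else:
--                 new.append(cur)
--         res = new
--     return ''.join(res)
-- ===== Notes on version B (the rewrite author's own statement) =====
-- stated objective: alternative
-- what changed: B replaces A's single pass with a running count dictionary by a character-at-a-time scatter: for each distinct character (in first-occurrence order) it sweeps the string once, numbering that character's occurrences 1,2,... into a result column, and joins at the end.
import Mathlib
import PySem

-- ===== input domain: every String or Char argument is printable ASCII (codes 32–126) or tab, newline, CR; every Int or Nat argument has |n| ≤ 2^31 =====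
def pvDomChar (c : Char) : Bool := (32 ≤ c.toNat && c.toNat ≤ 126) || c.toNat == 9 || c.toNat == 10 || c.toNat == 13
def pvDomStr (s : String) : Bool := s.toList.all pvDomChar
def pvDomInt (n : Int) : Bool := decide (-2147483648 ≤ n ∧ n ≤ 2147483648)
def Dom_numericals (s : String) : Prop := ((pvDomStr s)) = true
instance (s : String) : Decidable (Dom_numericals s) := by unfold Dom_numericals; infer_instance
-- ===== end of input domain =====

-- B replaces A's single-pass running-count dictionary with a per-character scatter
-- (one sweep per distinct character, numbering its occurrences); same return value.


-- ===== PORT A =====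
-- one step of A's loop: update the count dict for `symbol`, then append str(count)
def numericalsStep (st : PySem.Dict Char Int × List Char) (symbol : Char) :
    PySem.Dict Char Int × List Char :=
  let d := if st.1.contains symbol = false then st.1.insert symbol 1
           else st.1.modify symbol 0 (· + 1)
  (d, st.2 ++ PySem.Int.toChars (d.getD symbol 0))

def numericals (s : String) : String :=
  String.mk (s.toList.foldl numericalsStep (PySem.Dict.empty, [])).2

-- ===== PORT B =====
-- B's inner sweep for one character c: over zip(s, res), number c's occurrences, keep others
def numericalsInner (c : Char) (pairs : List (Char × List Char)) : Int × List (List Char) :=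
  pairs.foldl
    (fun st p =>
      if p.1 == c then (st.1 + 1, st.2 ++ [PySem.Int.toChars (st.1 + 1)])
      else (st.1, st.2 ++ [p.2]))
    (0, [])

def numericals_alt (s : String) : String :=
  String.mk (PySem.Chars.join []
    ((PySem.List.dedup s.toList).foldl
      (fun res c => (numericalsInner c (s.toList.zip res)).2)
      (List.replicate s.toList.length [])))

-- ===== PRECONDITION & SPEC =====
def Spec_numericals (s : String) (out : String) : Prop := out = numericals_alt s
instance (s : String) (out : String) : Decidable (Spec_numericals s out) := by unfold Spec_numericals; infer_instance

-- ===== CLAIM (what is proved, stated in full; the proofs are below) =====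
def Claim_equal_numericals : Prop := ∀ (s : String), Dom_numericals s → Spec_numericals s (numericals s)

-- ===== LEMMAS AND PROOFS =====

-- bump the running count of character ch
def pvBump (g : Char → Int) (ch : Char) : Char → Int := fun x => g x + if x = ch then 1 else 0

-- closed form of both ports' output: g x = occurrences of x already consumed
def pvF : List Char → (Char → Int) → List Char
  | [], _ => []
  | c :: t, g => PySem.Int.toChars (g c + 1) ++ pvF t (pvBump g c)

-- B's intermediate res after the characters of S have been scattered
def pvG (S : List Char) : List Char → (Char → Int) → List (List Char)
  | [], _ => []
  | ch :: t, g =>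
      (if ch ∈ S then PySem.Int.toChars (g ch + 1) else []) :: pvG S t (pvBump g ch)

lemma pvStep_getD (d : PySem.Dict Char Int) (c x : Char) :
    ((if d.contains c = false then d.insert c 1 else d.modify c 0 (· + 1)).getD x 0)
      = pvBump (fun y => d.getD y 0) c x := by
  unfold pvBump
  by_cases h : d.contains c = false
  · simp only [h, if_true]
    by_cases hx : x = c
    · subst hx
      rw [PySem.Dict.getD_insert_self]
      simp [PySem.Dict.getD, (PySem.Dict.get?_eq_none_iff_contains d x).2 h]
    · rw [PySem.Dict.getD_insert_of_ne d 1 0 hx]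
      simp [hx]
  · rw [if_neg h, PySem.Dict.getD_modify]
    by_cases hx : x = c <;> simp [hx]

lemma pvA_closed (l : List Char) (d : PySem.Dict Char Int) (out : List Char) :
    (l.foldl numericalsStep (d, out)).2 = out ++ pvF l (fun x => d.getD x 0) := by
  induction l generalizing d out with
  | nil => simp [pvF]
  | cons c t ih =>
    simp only [List.foldl_cons, numericalsStep, pvF]
    rw [ih]
    have hg : (fun x => ((if d.contains c = false then d.insert c 1
        else d.modify c 0 (· + 1)).getD x 0))
        = pvBump (fun y => d.getD y 0) c := funext (pvStep_getD d c)
    rw [hg, pvStep_getD d c c]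
    simp [pvBump]

lemma pvG_nil (l : List Char) (g : Char → Int) :
    pvG [] l g = List.replicate l.length [] := by
  induction l generalizing g with
  | nil => simp [pvG]
  | cons c t ih => simp [pvG, List.replicate_succ, ih]

lemma pvG_congr (S S' : List Char) (h : ∀ x, x ∈ S ↔ x ∈ S') (l : List Char) (g : Char → Int) :
    pvG S l g = pvG S' l g := by
  induction l generalizing g with
  | nil => simp [pvG]
  | cons c t ih => simp only [pvG, ih]; rw [if_congr (h c) rfl rfl]

lemma pvInner_spec (c : Char) (S : List Char) (l : List Char) (g : Char → Int)
    (acc : List (List Char)) :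
    (l.zip (pvG S l g)).foldl
        (fun st p =>
          if p.1 == c then (st.1 + 1, st.2 ++ [PySem.Int.toChars (st.1 + 1)])
          else (st.1, st.2 ++ [p.2]))
        (g c, acc)
      = (g c + (l.count c : Int), acc ++ pvG (c :: S) l g) := by
  induction l generalizing g acc with
  | nil => simp [pvG]
  | cons ch t ih =>
    simp only [pvG, List.zip_cons_cons, List.foldl_cons]
    by_cases hc : ch = c
    · subst hc
      simp only [beq_self_eq_true, if_true]
      have h1 : g ch + 1 = pvBump g ch ch := by simp [pvBump]
      rw [h1, ih (pvBump g ch) (acc ++ [PySem.Int.toChars (pvBump g ch ch)])]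
      simp only [List.count_cons, List.mem_cons, beq_self_eq_true,
        List.append_assoc, List.singleton_append, Prod.mk.injEq, true_or, if_true]
      constructor
      · simp only [pvBump]; push_cast; ring
      · trivial
    · have hbeq : (ch == c) = false := by simp [hc]
      simp only [hbeq, Bool.false_eq_true, if_false]
      have h1 : g c = pvBump g ch c := by
        unfold pvBump
        rw [if_neg (fun h => hc (Eq.symm h))]
        ring
      rw [h1, ih (pvBump g ch) (acc ++ [if ch ∈ S then PySem.Int.toChars (g ch + 1) else []])]
      have hmem : (ch ∈ c :: S) ↔ (ch ∈ S) := by simp [hc]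
      have hcnt : List.count c (ch :: t) = List.count c t := by simp [List.count_cons, hbeq]
      rw [hcnt]
      simp only [List.append_assoc, List.singleton_append, Prod.mk.injEq]
      constructor
      · trivial
      · rw [if_congr hmem rfl rfl]

lemma pvOuter (cs S l : List Char) :
    cs.foldl (fun res c => (numericalsInner c (l.zip res)).2) (pvG S l (fun _ => 0))
      = pvG (cs ++ S) l (fun _ => 0) := by
  induction cs generalizing S with
  | nil => simp
  | cons c cs ih =>
    simp only [List.foldl_cons]
    have hstep : (numericalsInner c (l.zip (pvG S l (fun _ => 0)))).2
        = pvG (c :: S) l (fun _ => 0) := by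
      unfold numericalsInner
      have h0 : ((0 : Int), ([] : List (List Char)))
          = ((fun _ => (0 : Int)) c, ([] : List (List Char))) := rfl
      rw [h0, pvInner_spec c S l (fun _ => 0) []]
      simp
    rw [hstep, ih (c :: S)]
    exact pvG_congr _ _ (by intro x; simp; tauto) l _

lemma pvG_flatten (l : List Char) : ∀ (S : List Char) (g : Char → Int),
    (∀ ch ∈ l, ch ∈ S) → (pvG S l g).flatten = pvF l g := by
  induction l with
  | nil => intro S g _; simp [pvG, pvF]
  | cons c t ih =>
    intro S g h
    simp only [pvG, pvF, List.flatten_cons]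
    rw [if_pos (h c List.mem_cons_self), ih S (pvBump g c)
      (fun ch hch => h ch (List.mem_cons_of_mem c hch))]

lemma pvJoin_nil_flatten (l : List (List Char)) : PySem.Chars.join [] l = l.flatten := by
  induction l with
  | nil => simp [PySem.Chars.join_nil]
  | cons a t ih =>
    cases t with
    | nil => simp [PySem.Chars.join_singleton]
    | cons b u =>
      simp only [PySem.Chars.join_cons_cons] at *
      simp [ih]

-- ===== VERDICT (by name: the statement is the Claim_ definition above) =====
theorem numericals_spec : Claim_equal_numericals := by
  intro s _
  unfold Spec_numericals numericals numericals_alt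
  rw [pvA_closed]
  rw [show List.replicate s.toList.length ([] : List Char)
        = pvG [] s.toList (fun _ => 0) from (pvG_nil s.toList (fun _ => 0)).symm,
    pvOuter, pvJoin_nil_flatten,
    pvG_flatten s.toList _ (fun _ => 0)
      (by intro ch hch; simpa [PySem.List.mem_dedup] using hch)]
  have he : (fun x : Char => (PySem.Dict.empty : PySem.Dict Char Int).getD x 0) = (fun _ => (0 : Int)) :=
    funext (fun x => PySem.Dict.getD_empty x 0)
  simp only [List.nil_append, he]
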